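-- pv_equiv track=rewrite | github.com/AleMarco1/kepler-ecg | scripts/prepare_qtc_dataset.py | extract_diagnostic_class
-- ===== SOURCE A (Python) =====
-- from typing import Dict, Tuple
--
-- def extract_diagnostic_class(scp_codes: Dict) -> str:
--     """Extract diagnostic class from SCP codes."""
--     if not scp_codes:
--         return 'UNKNOWN'
--
--     # Priority order for classification
--     mi_codes = ['IMI', 'AMI', 'PMI', 'MI']
--     hyp_codes = ['LVH', 'RVH', 'LVOLT', 'HVOLT', 'HYP']
--     cd_codes = ['LAFB', 'LPFB', 'LBBB', 'RBBB', 'IRBBB', 'IVCD']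
--     sttc_codes = ['STTC', 'STD', 'STE', 'INVT', 'NST_']
--
--     for code in scp_codes.keys():
--         if code in mi_codes or code.startswith('MI'):
--             return 'MI'
--
--     for code in scp_codes.keys():
--         if code in hyp_codes:
--             return 'HYP'
--
--     for code in scp_codes.keys():
--         if code in cd_codes:
--             return 'CD'
--
--     for code in scp_codes.keys():
--         if code in sttc_codes or code.startswith('NST'):
--             return 'STTC'
--
--     if 'NORM' in scp_codes and scp_codes['NORM'] >= 50:
--         return 'NORM'
--
--     return 'OTHER'
-- ===== SOURCE B (Python) =====
-- def extract_diagnostic_class(scp_codes):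
--     """Extract diagnostic class from SCP codes (single pass gathering flags)."""
--     if not scp_codes:
--         return 'UNKNOWN'
--     mi = hyp = cd = sttc = False
--     for code in scp_codes:
--         mi = mi or code in ('IMI', 'AMI', 'PMI', 'MI') or code.startswith('MI')
--         hyp = hyp or code in ('LVH', 'RVH', 'LVOLT', 'HVOLT', 'HYP')
--         cd = cd or code in ('LAFB', 'LPFB', 'LBBB', 'RBBB', 'IRBBB', 'IVCD')
--         sttc = sttc or code in ('STTC', 'STD', 'STE', 'INVT', 'NST_') or code.startswith('NST')
--     for flag, label in ((mi, 'MI'), (hyp, 'HYP'), (cd, 'CD'), (sttc, 'STTC')):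
--         if flag:
--             return label
--     if scp_codes.get('NORM', 0) >= 50:
--         return 'NORM'
--     return 'OTHER'
-- ===== Notes on version B (the rewrite author's own statement) =====
-- stated objective: alternative
-- what changed: A makes four separate passes over the keys, one per class with an early return; B makes a single pass accumulating four boolean presence flags and then returns the highest-priority present class.
import Mathlib
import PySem

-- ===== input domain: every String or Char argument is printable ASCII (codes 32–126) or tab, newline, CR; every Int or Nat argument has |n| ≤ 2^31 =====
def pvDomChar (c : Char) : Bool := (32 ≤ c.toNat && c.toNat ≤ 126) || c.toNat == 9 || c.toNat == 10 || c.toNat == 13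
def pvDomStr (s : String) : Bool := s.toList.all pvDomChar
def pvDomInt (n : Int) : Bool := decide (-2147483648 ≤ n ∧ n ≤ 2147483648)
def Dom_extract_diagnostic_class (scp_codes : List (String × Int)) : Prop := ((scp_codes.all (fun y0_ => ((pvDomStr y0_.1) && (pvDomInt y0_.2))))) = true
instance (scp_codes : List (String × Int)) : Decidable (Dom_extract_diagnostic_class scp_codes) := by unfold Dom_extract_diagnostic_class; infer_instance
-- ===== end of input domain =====

-- B replaces A's four priority passes over the keys by a single pass that accumulates
-- four boolean presence flags and then returns the highest-priority present class (alternative decomposition).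


-- ===== PORT A =====
-- A: four passes over the keys, each an early-returning `for` loop (ported as List.any),
-- then the NORM lookup ('NORM' in scp_codes and scp_codes['NORM'] >= 50), then 'OTHER'.
def pvAmi (c : String) : Bool := c ∈ ["IMI", "AMI", "PMI", "MI"] || PySem.Str.startswith c "MI"
def pvAhyp (c : String) : Bool := c ∈ ["LVH", "RVH", "LVOLT", "HVOLT", "HYP"]
def pvAcd (c : String) : Bool := c ∈ ["LAFB", "LPFB", "LBBB", "RBBB", "IRBBB", "IVCD"]
def pvAsttc (c : String) : Bool := c ∈ ["STTC", "STD", "STE", "INVT", "NST_"] || PySem.Str.startswith c "NST"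

def extract_diagnostic_class (scp_codes : List (String × Int)) : String :=
  if scp_codes = [] then "UNKNOWN"
  else if scp_codes.any (fun kv => pvAmi kv.1) then "MI"
  else if scp_codes.any (fun kv => pvAhyp kv.1) then "HYP"
  else if scp_codes.any (fun kv => pvAcd kv.1) then "CD"
  else if scp_codes.any (fun kv => pvAsttc kv.1) then "STTC"
  else
    match scp_codes.lookup "NORM" with
    | some v => if v ≥ 50 then "NORM" else "OTHER"
    | none => "OTHER"

-- ===== PORT B =====
-- B: one fold over the keys accumulating four presence flags, then a priority chain.
def pvStep (acc : Bool × Bool × Bool × Bool) (c : String) : Bool × Bool × Bool × Bool :=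
  (acc.1 || c ∈ ["IMI", "AMI", "PMI", "MI"] || PySem.Str.startswith c "MI",
   acc.2.1 || c ∈ ["LVH", "RVH", "LVOLT", "HVOLT", "HYP"],
   acc.2.2.1 || c ∈ ["LAFB", "LPFB", "LBBB", "RBBB", "IRBBB", "IVCD"],
   acc.2.2.2 || c ∈ ["STTC", "STD", "STE", "INVT", "NST_"] || PySem.Str.startswith c "NST")

def extract_diagnostic_class_alt (scp_codes : List (String × Int)) : String :=
  if scp_codes = [] then "UNKNOWN"
  else
    let f := scp_codes.foldl (fun acc kv => pvStep acc kv.1) (false, false, false, false)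
    if f.1 then "MI"
    else if f.2.1 then "HYP"
    else if f.2.2.1 then "CD"
    else if f.2.2.2 then "STTC"
    else if ((scp_codes.lookup "NORM").getD 0) ≥ 50 then "NORM"
    else "OTHER"

-- ===== PRECONDITION & SPEC =====
-- A is total: no Pre_.
def Spec_extract_diagnostic_class (scp_codes : List (String × Int)) (out : String) : Prop := out = extract_diagnostic_class_alt scp_codes
instance (scp_codes : List (String × Int)) (out : String) : Decidable (Spec_extract_diagnostic_class scp_codes out) := by unfold Spec_extract_diagnostic_class; infer_instance

-- ===== CLAIM (what is proved, stated in full; the proofs are below) =====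
def Claim_equal_extract_diagnostic_class : Prop := ∀ (scp_codes : List (String × Int)), Dom_extract_diagnostic_class scp_codes → Spec_extract_diagnostic_class scp_codes (extract_diagnostic_class scp_codes)

-- ===== LEMMAS AND PROOFS =====
-- The fold of pvStep computes exactly the four `any`s of A's four passes.
theorem pvStep_foldl (l : List (String × Int)) (acc : Bool × Bool × Bool × Bool) :
    l.foldl (fun acc kv => pvStep acc kv.1) acc =
      (acc.1 || l.any (fun kv => pvAmi kv.1),
       acc.2.1 || l.any (fun kv => pvAhyp kv.1),
       acc.2.2.1 || l.any (fun kv => pvAcd kv.1),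
       acc.2.2.2 || l.any (fun kv => pvAsttc kv.1)) := by
  induction l generalizing acc with
  | nil => simp
  | cons hd tl ih =>
    rw [List.foldl_cons, ih]
    simp [pvStep, pvAmi, pvAhyp, pvAcd, pvAsttc, List.any_cons, Bool.or_assoc]

-- ===== VERDICT (by name: the statement is the Claim_ definition above) =====
theorem extract_diagnostic_class_spec : Claim_equal_extract_diagnostic_class := by
  intro scp _
  unfold Spec_extract_diagnostic_class extract_diagnostic_class extract_diagnostic_class_alt
  rw [pvStep_foldl]
  simp only [Bool.false_or]
  by_cases h1 : scp.any (fun kv => pvAmi kv.1) = true <;>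
  by_cases h2 : scp.any (fun kv => pvAhyp kv.1) = true <;>
  by_cases h3 : scp.any (fun kv => pvAcd kv.1) = true <;>
  by_cases h4 : scp.any (fun kv => pvAsttc kv.1) = true <;>
  simp [h1, h2, h3, h4] <;>
  (cases hl : scp.lookup "NORM" with
   | none => simp
   | some v => by_cases hv : v ≥ 50 <;> simp [hv])
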